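-- pv_equiv track=rewrite | github.com/Stefan1007/BIOINFO2 | Project_L6/L6/2ex.py | ecoRI_fragments
-- ===== SOURCE A (Python) =====
-- from typing import List, Dict
--
-- CUT_SITE = "GAATTC"           # EcoRI
--
-- def ecoRI_fragments(seq: str, site: str = CUT_SITE) -> List[int]:
--     cuts = []
--     pos = seq.find(site)
--     while pos != -1:
--         cuts.append(pos + 1)      # cut after the leading G
--         pos = seq.find(site, pos + 1)
--     positions = [0] + sorted(cuts) + [len(seq)]
--     return [positions[i + 1] - positions[i] for i in range(len(positions) - 1)]
-- ===== SOURCE B (Python) =====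
-- CUT_SITE = "GAATTC"           # EcoRI
--
-- def ecoRI_fragments(seq, site=CUT_SITE):
--     # naive sliding-window match: compare the window seq[i:i+m] at every
--     # start index, emitting each fragment length as soon as a cut is found
--     m = len(site)
--     frags = []
--     prev = 0
--     for i in range(len(seq) - m + 1):
--         if seq[i:i+m] == site:
--             frags.append(i + 1 - prev)
--             prev = i + 1
--     frags.append(len(seq) - prev)
--     return frags
-- ===== Notes on version B (the rewrite author's own statement) =====
-- stated objective: alternative
-- what changed: Replaces the repeated str.find scan plus cut-position list, [0]/[len] padding, sorted() and adjacent-difference pass by a naive sliding-window matcher: one for-loop over all window start indices comparing seq[i:i+m] == site, emitting each fragment length on the fly with a prev marker.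
import Mathlib
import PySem

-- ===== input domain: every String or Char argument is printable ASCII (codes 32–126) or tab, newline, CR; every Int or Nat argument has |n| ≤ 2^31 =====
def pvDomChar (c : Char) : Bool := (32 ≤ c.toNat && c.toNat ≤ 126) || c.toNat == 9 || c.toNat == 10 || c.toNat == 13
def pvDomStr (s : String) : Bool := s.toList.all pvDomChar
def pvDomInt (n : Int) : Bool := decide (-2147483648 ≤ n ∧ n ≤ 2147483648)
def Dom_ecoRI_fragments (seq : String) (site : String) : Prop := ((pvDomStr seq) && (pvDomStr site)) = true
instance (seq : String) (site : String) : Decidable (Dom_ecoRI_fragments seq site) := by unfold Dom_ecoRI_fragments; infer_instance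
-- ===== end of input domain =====

-- B replaces A's repeated str.find scan + cut list + [0]/[len] padding + sorted() +
-- adjacent differences by a naive sliding-window matcher (seq[i:i+m] == site at every
-- start index) that emits each fragment length on the fly (objective: alternative).

-- ===== PORT A =====
-- the 'while pos != -1' loop collecting cut positions; fuel (= len(seq)+1) only makes
-- the recursion total — find positions strictly increase and stay ≤ len(seq)
def pvCutsLoop (seq site : String) : Nat → Int → List Int → List Int
  | 0, _, cuts => cuts
  | fuel+1, pos, cuts =>
    if pos = -1 then cuts
    else pvCutsLoop seq site fuel (PySem.Str.findFrom seq site (pos+1)) (cuts ++ [pos+1])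

def ecoRI_fragments (seq : String) (site : String) : List Int :=
  let cuts := pvCutsLoop seq site ((PySem.Str.len seq).toNat + 1) (PySem.Str.find seq site) []
  let positions := [(0:Int)] ++ PySem.List.sorted cuts id ++ [PySem.Str.len seq]
  (PySem.List.pyRange 0 ((positions.length : Int) - 1) 1).map
    (fun i => PySem.List.pyGetD positions (i+1) 0 - PySem.List.pyGetD positions i 0)

-- ===== PORT B =====
-- Source B's for-loop over range(len(seq)-m+1) carrying (frags, prev)
def ecoRI_fragments_alt (seq : String) (site : String) : List Int :=
  let m : Int := PySem.Str.len site
  let r := (PySem.List.pyRange 0 (PySem.Str.len seq - m + 1) 1).foldl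
    (fun (st : List Int × Int) i =>
      if PySem.Str.slice seq (some i) (some (i + m)) = site
      then (st.1 ++ [i + 1 - st.2], i + 1) else st)
    ([], 0)
  r.1 ++ [PySem.Str.len seq - r.2]

-- ===== PRECONDITION & SPEC =====
def Spec_ecoRI_fragments (seq : String) (site : String) (out : List Int) : Prop := out = ecoRI_fragments_alt seq site
instance (seq : String) (site : String) (out : List Int) : Decidable (Spec_ecoRI_fragments seq site out) := by unfold Spec_ecoRI_fragments; infer_instance

-- ===== CLAIM (what is proved, stated in full; the proofs are below) =====
def Claim_equal_ecoRI_fragments : Prop := ∀ (seq : String) (site : String), Dom_ecoRI_fragments seq site → Spec_ecoRI_fragments seq site (ecoRI_fragments seq site)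

-- ===== LEMMAS AND PROOFS =====

-- adjacent differences of prev :: cuts, and the last of prev :: cuts
def pvAdjFrom (prev : Int) : List Int → List Int
  | [] => []
  | c :: t => (c - prev) :: pvAdjFrom c t

def pvLastOf (prev : Int) : List Int → Int
  | [] => prev
  | c :: t => pvLastOf c t

-- the match indices of the sliding window: i < R with site a prefix of seq.toList.drop i
def pvOccB (s t : List Char) (i : Nat) : Bool := decide (t <+: s.drop i)

def pvMatches (s t : List Char) (k len : Nat) : List Int :=
  ((List.range' k len).filter (pvOccB s t)).map (fun i : Nat => ((i : Int) + 1 : Int))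

theorem pv_findFrom_gt (s sub : List Char) (k : Int) (h : (s.length : Int) < k) :
    PySem.Chars.findFrom s sub k none = -1 := by
  simp only [PySem.Chars.findFrom]
  rw [if_neg (by omega : ¬ k < 0), if_pos h]

theorem pvCutsLoop_neg_one (seq site : String) (f : Nat) (acc : List Int) :
    pvCutsLoop seq site f (-1) acc = acc := by
  cases f <;> simp [pvCutsLoop]

theorem pvCutsLoop_append (seq site : String) :
    ∀ (f : Nat) (pos : Int) (acc : List Int),
      pvCutsLoop seq site f pos acc = acc ++ pvCutsLoop seq site f pos [] := by
  intro f
  induction f with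
  | zero => intro pos acc; simp [pvCutsLoop]
  | succ f ih =>
    intro pos acc
    by_cases h : pos = -1
    · simp [pvCutsLoop, h]
    · simp only [pvCutsLoop, if_neg h]
      rw [ih _ (acc ++ [pos+1]), ih _ ([] ++ [pos+1])]
      simp

-- occurrence somewhere at index ≥ k means an infix of the k-suffix
theorem pv_occ_infix (s t : List Char) (k i : Nat) (hk : k ≤ i)
    (h : t <+: s.drop i) : t <:+: s.drop k := by
  rw [List.infix_iff_prefix_suffix]
  exact ⟨s.drop i, by rwa [show i = k + (i - k) by omega, ← List.drop_drop] at h ⊢,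
         by rw [show i = k + (i - k) by omega, ← List.drop_drop]; exact List.drop_suffix _ _⟩

-- A's find loop collects exactly the window-match indices ≥ k, shifted by one
theorem pv_cutsA (seq site : String) :
    ∀ (fuel k : Nat), k ≤ seq.toList.length + 1 → seq.toList.length + 1 - k ≤ fuel →
      pvCutsLoop seq site fuel (PySem.Chars.findFrom seq.toList site.toList (k : Int) none) [] =
        pvMatches seq.toList site.toList k
          (((seq.toList.length : Int) - site.toList.length + 1).toNat - k) := by
  set s := seq.toList with hs
  set t := site.toList with ht
  set n := s.length with hn
  set R := (((n : Int)) - t.length + 1).toNat with hR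
  have hRle : R ≤ n + 1 := by omega
  intro fuel
  induction fuel with
  | zero =>
    intro k hk hf
    have : k = n + 1 := by omega
    subst this
    rw [pv_findFrom_gt s t _ (by push_cast; omega)]
    rw [pvCutsLoop_neg_one]
    unfold pvMatches
    rw [show R - (n+1) = 0 by omega]
    simp
  | succ fuel ih =>
    intro k hk hf
    by_cases hk1 : k = n + 1
    · subst hk1
      rw [pv_findFrom_gt s t _ (by push_cast; omega), pvCutsLoop_neg_one]
      unfold pvMatches
      rw [show R - (n+1) = 0 by omega]
      simp
    have hkn : k ≤ n := by omega
    by_cases hneg : PySem.Chars.findFrom s t (k : Int) none = -1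
    · rw [hneg, pvCutsLoop_neg_one]
      have hno : ¬ t <:+: s.drop k :=
        (PySem.Chars.findFrom_natCast_eq_neg_one_iff s t k hkn).mp hneg
      unfold pvMatches
      rw [List.filter_eq_nil_iff.mpr ?_]
      · simp
      · intro i hi
        have hik : k ≤ i := (List.mem_range'_1.mp hi).1
        simp only [pvOccB, decide_eq_true_eq]
        intro hpre
        exact hno (pv_occ_infix s t k i hik hpre)
    · obtain ⟨hge, hpre, hmin⟩ := PySem.Chars.findFrom_natCast_spec s t k hkn hneg
      set p := PySem.Chars.findFrom s t (k : Int) none with hp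
      set q := p.toNat with hq
      have hpq : p = (q : Int) := by omega
      have hqk : k ≤ q := by omega
      have hqn : q ≤ n := by
        by_contra hgt
        have hnil : s.drop q = [] := List.drop_eq_nil_of_le (by omega)
        rw [hnil] at hpre
        have ht0 : t = [] := List.prefix_nil.mp hpre
        exact (hmin k le_rfl (by omega)) (by simp [ht0])
      have hqR : q < R := by
        have hlen := hpre.length_le
        rw [List.length_drop] at hlen
        omega
      -- unfold one loop step
      rw [show pvCutsLoop seq site (fuel+1) p [] =
            pvCutsLoop seq site fuel (PySem.Str.findFrom seq site (p+1)) [p+1] by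
          rw [pvCutsLoop, if_neg hneg]; rfl]
      rw [pvCutsLoop_append]
      have hcast : p + 1 = ((q + 1 : Nat) : Int) := by omega
      rw [hcast, PySem.Str.findFrom_eq,
          ih (q+1) (by omega) (by omega)]
      -- split the range at q
      unfold pvMatches
      have hsplit : List.range' k (R - k) = List.range' k (q - k) ++ q :: List.range' (q+1) (R - (q+1)) := by
        rw [show q :: List.range' (q+1) (R-(q+1)) = List.range' q (R - q) by
              rw [show R - q = (R - (q+1)) + 1 by omega, List.range'_succ]]
        rw [show List.range' k (q - k) ++ List.range' q (R - q)
              = List.range' k ((q - k) + (R - q)) by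
              rw [← List.range'_append]; congr 2 <;> omega]
        congr 1; omega
      rw [hsplit, List.filter_append]
      have hfail : (List.range' k (q - k)).filter (pvOccB s t) = [] := by
        apply List.filter_eq_nil_iff.mpr
        intro i hi
        obtain ⟨hik, hiu⟩ := List.mem_range'_1.mp hi
        simp only [pvOccB, decide_eq_true_eq]
        exact hmin i hik (by omega)
      have hocc : pvOccB s t q = true := by simp [pvOccB, hpre]
      rw [hfail, List.filter_cons_of_pos hocc]
      simp only [List.nil_append, List.map_cons, List.singleton_append]
      push_cast
      simp

-- B's fold characterized by pvAdjFrom/pvLastOf over the filtered match list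
theorem pv_foldB (s t : List Char) (g : List Int × Int → Nat → List Int × Int)
    (hg : ∀ st i, g st i = if pvOccB s t i then (st.1 ++ [(i:Int) + 1 - st.2], (i:Int) + 1) else st) :
    ∀ (l : List Nat) (acc : List Int) (prev : Int),
      l.foldl g (acc, prev) =
        (acc ++ pvAdjFrom prev ((l.filter (pvOccB s t)).map (fun i : Nat => ((i : Int) + 1 : Int))),
         pvLastOf prev ((l.filter (pvOccB s t)).map (fun i : Nat => ((i : Int) + 1 : Int)))) := by
  intro l
  induction l with
  | nil => intro acc prev; simp [pvAdjFrom, pvLastOf]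
  | cons i l ih =>
    intro acc prev
    rw [List.foldl_cons, hg]
    by_cases h : pvOccB s t i = true
    · rw [if_pos h, ih, List.filter_cons_of_pos h]
      simp [pvAdjFrom, pvLastOf]
    · rw [if_neg h, ih, List.filter_cons_of_neg (by simpa using h)]

-- the Int-indexed comprehension rewritten with Nat indices
theorem pv_comp_eq_nat (xs : List Int) :
    (PySem.List.pyRange 0 ((xs.length : Int) - 1) 1).map
      (fun i => PySem.List.pyGetD xs (i+1) 0 - PySem.List.pyGetD xs i 0)
    = (List.range (xs.length - 1)).map
      (fun k => xs.getD (k+1) 0 - xs.getD k 0) := by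
  rw [PySem.List.pyRange_one, List.map_map]
  have h : (((xs.length : Int)) - 1 - 0).toNat = xs.length - 1 := by omega
  rw [h]
  apply List.map_congr_left
  intro k _
  simp only [Function.comp_apply, zero_add]
  rw [show (k:Int) + 1 = ((k+1 : Nat) : Int) by push_cast; ring,
      PySem.List.pyGetD_natCast, PySem.List.pyGetD_natCast]

theorem pv_natDiff_cons (a b : Int) (t : List Int) :
    (List.range ((a :: b :: t).length - 1)).map
      (fun k => (a :: b :: t).getD (k+1) 0 - (a :: b :: t).getD k 0)
    = (b - a) ::
      (List.range ((b :: t).length - 1)).map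
        (fun k => (b :: t).getD (k+1) 0 - (b :: t).getD k 0) := by
  simp only [List.length_cons, Nat.add_sub_cancel, List.range_succ_eq_map,
    List.map_cons, List.map_map]
  congr 1

theorem pv_diffComp_eq (n : Int) :
    ∀ (cuts : List Int) (prev : Int),
      (PySem.List.pyRange 0 (((prev :: (cuts ++ [n])).length : Int) - 1) 1).map
        (fun i => PySem.List.pyGetD (prev :: (cuts ++ [n])) (i+1) 0 -
                  PySem.List.pyGetD (prev :: (cuts ++ [n])) i 0)
      = pvAdjFrom prev cuts ++ [n - pvLastOf prev cuts] := by
  intro cuts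
  induction cuts with
  | nil =>
    intro prev
    rw [pv_comp_eq_nat]
    simp [pvAdjFrom, pvLastOf]
  | cons c t ih =>
    intro prev
    rw [pv_comp_eq_nat]
    have ih' := ih c
    rw [pv_comp_eq_nat] at ih'
    rw [show prev :: ((c :: t) ++ [n]) = prev :: c :: (t ++ [n]) by simp,
        pv_natDiff_cons, ih']
    simp [pvAdjFrom, pvLastOf]

-- the match list is strictly increasing, so A's sorted() is the identity on it
theorem pv_matches_pairwise (s t : List Char) (k len : Nat) :
    (pvMatches s t k len).Pairwise (· < ·) := by
  unfold pvMatches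
  rw [List.pairwise_map]
  exact (List.Pairwise.sublist List.filter_sublist (List.pairwise_lt_range' 1)).imp
    (fun h => by omega)

-- ===== VERDICT (by name: the statement is the Claim_ definition above) =====
theorem ecoRI_fragments_spec : Claim_equal_ecoRI_fragments := by
  intro seq site _
  unfold Spec_ecoRI_fragments ecoRI_fragments ecoRI_fragments_alt
  have hn : PySem.Str.len seq = (seq.toList.length : Int) := PySem.Str.len_eq seq
  have hm : PySem.Str.len site = (site.toList.length : Int) := PySem.Str.len_eq site
  set s := seq.toList with hs
  set t := site.toList with ht
  set n := s.length with hnn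
  set R := (((n : Int)) - t.length + 1).toNat with hR
  -- A's cut positions are exactly the window-match indices, shifted by one
  have hfind : PySem.Str.find seq site = PySem.Chars.findFrom s t ((0 : Nat) : Int) none := by
    rw [PySem.Str.find_eq, Nat.cast_zero, PySem.Chars.findFrom_zero]
  have hcuts : pvCutsLoop seq site (((n : Int)).toNat + 1) (PySem.Str.find seq site) []
      = pvMatches s t 0 R := by
    rw [hfind]
    have h := pv_cutsA seq site (((n : Int)).toNat + 1) 0 (by omega) (by simp [hnn, hs])
    simpa using h
  have hsorted : PySem.List.sorted (pvMatches s t 0 R) id = pvMatches s t 0 R :=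
    PySem.List.sorted_eq_of_perm_of_pairwise_lt _ _ id (List.Perm.refl _)
      (by simpa using pv_matches_pairwise s t 0 R)
  -- B's loop
  have hrange : PySem.List.pyRange 0 ((n : Int) - (t.length : Int) + 1) 1
      = (List.range R).map (fun k : Nat => ((0 : Int) + (k : Int))) := by
    rw [PySem.List.pyRange_one]
    congr 1
    rw [hR]
    norm_num
  have hcond : ∀ i : Nat,
      (PySem.Str.slice seq (some ((i : Int))) (some ((i : Int) + ((t.length : Nat) : Int))) = site)
        ↔ pvOccB s t i = true := by
    intro i
    rw [← String.toList_inj, PySem.Str.toList_slice, PySem.Chars.slice_eq_listSlice,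
        PySem.List.slice_natCast_add]
    unfold pvOccB
    rw [decide_eq_true_eq]
    constructor
    · intro h
      show site.toList <+: List.drop i seq.toList
      rw [← h]
      exact List.take_prefix _ _
    · intro h
      show List.take site.toList.length (List.drop i seq.toList) = site.toList
      exact (List.prefix_iff_eq_take.mp h).symm
  have hfold := pv_foldB s t
    (fun (st : List Int × Int) (k : Nat) =>
      if PySem.Str.slice seq (some ((0 : Int) + (k : Int)))
           (some ((0 : Int) + (k : Int) + ((t.length : Nat) : Int))) = site
      then (st.1 ++ [(0 : Int) + (k : Int) + 1 - st.2], (0 : Int) + (k : Int) + 1) else st)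
    (by
      intro st i
      simp only [zero_add]
      by_cases h : pvOccB s t i = true
      · rw [if_pos ((hcond i).mpr h), if_pos h]
      · rw [if_neg (fun hc => h ((hcond i).mp hc)), if_neg h])
    (List.range R) [] 0
  simp only [hn, hm]
  rw [hcuts, hsorted, hrange]
  simp only [List.foldl_map]
  rw [hfold]
  simp only [List.singleton_append, List.cons_append, List.nil_append]
  rw [pv_diffComp_eq ((n : Nat) : Int) (pvMatches s t 0 R) 0]
  unfold pvMatches
  rw [List.range_eq_range']
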